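-- pv_equiv track=rewrite | github.com/Constantine-Quantum-Tech/tqsim | tqsim/lib/basis_generator.py | check_outcomes
-- ===== SOURCE A (Python) =====
-- from typing import List
--
-- def check_rule(anyon1: int, anyon2: int, outcome: int) -> bool:
--     """ Returns True if 'anyon1 x anyon2 = outcome' obeys the Fibonacci
--     fusion rules, returns False otherwise.
--
--     Parameters
--     ----------
--     anyon1 : int
--         Anyon charge of the 1st anyon.
--     anyon2 : int
--         Anyon charge of the 2nd anyon.
--     outcome : int
--         Anyon charge of the fusion result.
--
--     Returns
--     -------
--     bool
--         True if the Fibonacci fusion rules are obeyed, False otherwise.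
--
--     """
--     if anyon1 and anyon2:
--         return True
--     elif (anyon1 or anyon2) and outcome == 1:
--         return True
--     elif not (anyon1 or anyon2) and outcome == 0:
--         return True
--     else:
--         return False
--
-- def check_outcomes(outcomes: List[int]) -> bool:
--     previous_outcome = 1
--
--     for outcome in outcomes:
--         if check_rule(previous_outcome, 1, outcome):
--             previous_outcome = outcome
--         else:
--             return False
--     return True
-- ===== SOURCE B (Python) =====
-- from typing import List
--
-- def check_outcomes(outcomes: List[int]) -> bool:
--     # Stage 1: index all positions holding the vacuum charge 0.
--     zeros = [i for i, x in enumerate(outcomes) if x == 0]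
--     # Stage 2: each such position (unless it is last) must be followed by a 1.
--     return all(i + 1 >= len(outcomes) or outcomes[i + 1] == 1 for i in zeros)
-- ===== Notes on version B (the rewrite author's own statement) =====
-- stated objective: alternative
-- what changed: Replaces A's stateful scan through the check_rule dispatcher with two staged passes: first build an index list of the positions holding charge 0, then verify by random access that each indexed position (unless last) is followed by charge 1.
import Mathlib
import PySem

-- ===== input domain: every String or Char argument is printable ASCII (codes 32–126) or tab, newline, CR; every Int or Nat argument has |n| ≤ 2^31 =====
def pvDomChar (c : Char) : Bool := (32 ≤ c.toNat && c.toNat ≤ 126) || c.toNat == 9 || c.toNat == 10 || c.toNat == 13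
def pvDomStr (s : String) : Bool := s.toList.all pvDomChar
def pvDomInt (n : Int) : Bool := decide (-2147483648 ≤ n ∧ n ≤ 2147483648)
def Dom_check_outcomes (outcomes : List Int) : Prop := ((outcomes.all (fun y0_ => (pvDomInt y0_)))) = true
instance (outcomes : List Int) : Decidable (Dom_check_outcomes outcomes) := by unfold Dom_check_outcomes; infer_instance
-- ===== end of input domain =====

-- B replaces A's stateful scan through check_rule with two staged passes: index the zero positions, then check each successor by random access (alternative decomposition, same cost).

-- ===== PORT A =====
def check_rule (anyon1 anyon2 outcome : Int) : Bool :=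
  if anyon1 ≠ 0 ∧ anyon2 ≠ 0 then true
  else if (anyon1 ≠ 0 ∨ anyon2 ≠ 0) ∧ outcome = 1 then true
  else if ¬(anyon1 ≠ 0 ∨ anyon2 ≠ 0) ∧ outcome = 0 then true
  else false

def check_outcomes_go (previous_outcome : Int) : List Int → Bool
  | [] => true
  | outcome :: rest =>
    if check_rule previous_outcome 1 outcome then check_outcomes_go outcome rest
    else false

def check_outcomes (outcomes : List Int) : Bool :=
  check_outcomes_go 1 outcomes

-- ===== PORT B =====
def check_outcomes_alt (outcomes : List Int) : Bool :=
  let zeros := (PySem.List.enumerate outcomes).filterMap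
    (fun p => if p.2 == 0 then some p.1 else none)
  zeros.all (fun i =>
    decide (i + 1 ≥ (outcomes.length : Int)) || (PySem.List.pyGet? outcomes (i + 1) == some 1))

-- ===== PRECONDITION & SPEC =====
def Spec_check_outcomes (outcomes : List Int) (out : Bool) : Prop := out = check_outcomes_alt outcomes
instance (outcomes : List Int) (out : Bool) : Decidable (Spec_check_outcomes outcomes out) := by unfold Spec_check_outcomes; infer_instance

-- ===== CLAIM (what is proved, stated in full; the proofs are below) =====
def Claim_equal_check_outcomes : Prop := ∀ (outcomes : List Int), Dom_check_outcomes outcomes → Spec_check_outcomes outcomes (check_outcomes outcomes)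

-- ===== LEMMAS AND PROOFS =====
-- "every 0 is followed by a 1" — the common characterisation of both programs
def PairOk (l : List Int) : Prop :=
  ∀ (k : Nat) (h : k + 1 < l.length), l[k]'(by omega) = 0 → l[k + 1]'h = 1

theorem check_rule_one (prev outcome : Int) :
    check_rule prev 1 outcome = !(prev == 0 && outcome != 1) := by
  simp only [check_rule]
  by_cases hp : prev = 0 <;> by_cases ho : outcome = 1 <;> simp [hp, ho]

theorem pairOk_cons (a : Int) (l : List Int) :
    PairOk (a :: l) ↔ ((∀ h : 0 < l.length, a = 0 → l[0]'h = 1) ∧ PairOk l) := by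
  constructor
  · intro H
    refine ⟨fun h ha => ?_, fun k h hk => ?_⟩
    · have := H 0 (by simpa using h)
      simpa using this ha
    · have := H (k + 1) (by simpa using Nat.succ_lt_succ h)
      simpa using this hk
  · rintro ⟨h0, H⟩ k h hk
    cases k with
    | zero => simpa using h0 (by simpa using h) (by simpa using hk)
    | succ k =>
      have := H k (by simpa using Nat.lt_of_succ_lt_succ h)
      simpa using this (by simpa using hk)

theorem go_iff (prev : Int) (l : List Int) :
    check_outcomes_go prev l = true ↔
      ((∀ h : 0 < l.length, prev = 0 → l[0]'h = 1) ∧ PairOk l) := by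
  induction l generalizing prev with
  | nil =>
    simp [check_outcomes_go, PairOk]
  | cons o rest ih =>
    by_cases hz : prev = 0 <;> by_cases ho : o = 1 <;>
      simp [check_outcomes_go, check_rule_one, hz, ho, ih, pairOk_cons]

theorem alt_iff (l : List Int) : check_outcomes_alt l = true ↔ PairOk l := by
  simp only [check_outcomes_alt, List.all_eq_true, List.mem_filterMap,
    PySem.List.mem_enumerate_iff]
  constructor
  · intro H k h hk
    have hb := H (k : Int) ⟨(k, l[k]'(by omega)), ⟨k, by omega, by simp⟩, by simp [hk]⟩
    simp only [Bool.or_eq_true, decide_eq_true_eq, beq_iff_eq] at hb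
    rcases hb with hb | hb
    · omega
    · have : PySem.List.pyGet? l ((k : Int) + 1) = l[k+1]? := by
        have : ((k : Int) + 1) = ((k + 1 : Nat) : Int) := by push_cast; ring
        rw [this, PySem.List.pyGet?_natCast]
      rw [this] at hb
      have := List.getElem?_eq_getElem (l := l) (i := k + 1) h
      rw [this] at hb
      simpa using hb
  · rintro H i ⟨p, ⟨k, hk, rfl⟩, hp⟩
    simp only [zero_add] at hp
    by_cases hz : l[k]'hk = 0
    · simp only [hz] at hp
      simp at hp
      subst hp
      by_cases hlast : k + 1 < l.length
      · have h1 := H k hlast hz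
        have hcast : PySem.List.pyGet? l ((k : Int) + 1) = l[k+1]? := by
          have h2 : ((k : Int) + 1) = ((k + 1 : Nat) : Int) := by push_cast; ring
          rw [h2, PySem.List.pyGet?_natCast]
        simp [hcast, List.getElem?_eq_getElem hlast, h1]
      · simp only [Bool.or_eq_true, decide_eq_true_eq]
        left; omega
    · simp [hz] at hp

-- ===== VERDICT (by name: the statement is the Claim_ definition above) =====
theorem check_outcomes_spec : Claim_equal_check_outcomes := by
  intro l _
  unfold Spec_check_outcomes check_outcomes
  have hA := go_iff 1 l
  have hB := alt_iff l
  cases hb : check_outcomes_alt l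
  · cases ha : check_outcomes_go 1 l
    · rfl
    · exfalso
      have hP : PairOk l := (hA.mp ha).2
      rw [hB.mpr hP] at hb
      exact Bool.true_eq_false.mp hb
  · rw [hb] at hB
    have hP : PairOk l := hB.mp rfl
    exact hA.mpr ⟨fun _ h1 => absurd h1 one_ne_zero, hP⟩
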